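-- pv_equiv track=rewrite | github.com/JonSteinn/Kattis-Solutions | src/Fibonacci Tour/Python 3/main.py | gen_all_fibs_less_or_equal_than
-- ===== SOURCE A (Python) =====
-- def gen_all_fibs_less_or_equal_than(n):
--     fibs = {}
--     a,b,c = 1,1,1
--     while True:
--         c = a+b
--         if c > n:
--             break
--         fibs[b] = c
--         a = b
--         b = c
--     fibs[b] = None
--     return fibs
-- ===== SOURCE B (Python) =====
-- def _fib_pair(m):
--     # fast doubling: returns (F(m), F(m+1)) with F(0)=0, F(1)=1
--     if m == 0:
--         return (0, 1)
--     f, g = _fib_pair(m >> 1)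
--     c = f * (2 * g - f)
--     d = f * f + g * g
--     if m & 1:
--         return (d, c + d)
--     return (c, d)
--
--
-- def _fib(m):
--     return _fib_pair(m)[0]
--
--
-- def gen_all_fibs_less_or_equal_than(n):
--     # largest index k >= 2 with F(k) <= n (F(2) = 1 is always a key)
--     k = 2
--     while _fib(k + 1) <= n:
--         k += 1
--     return {_fib(i): (_fib(i + 1) if i < k else None) for i in range(2, k + 1)}
-- ===== Notes on version B (the rewrite author's own statement) =====
-- stated objective: alternative
-- what changed: A threads a running Fibonacci pair (a,b) through one while-True loop that inserts into the dict as it goes; B computes Fibonacci numbers independently by index with fast doubling, searches for the largest index k with F(k) <= n, and builds the dict by a comprehension over the index range 2..k.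
import Mathlib
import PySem

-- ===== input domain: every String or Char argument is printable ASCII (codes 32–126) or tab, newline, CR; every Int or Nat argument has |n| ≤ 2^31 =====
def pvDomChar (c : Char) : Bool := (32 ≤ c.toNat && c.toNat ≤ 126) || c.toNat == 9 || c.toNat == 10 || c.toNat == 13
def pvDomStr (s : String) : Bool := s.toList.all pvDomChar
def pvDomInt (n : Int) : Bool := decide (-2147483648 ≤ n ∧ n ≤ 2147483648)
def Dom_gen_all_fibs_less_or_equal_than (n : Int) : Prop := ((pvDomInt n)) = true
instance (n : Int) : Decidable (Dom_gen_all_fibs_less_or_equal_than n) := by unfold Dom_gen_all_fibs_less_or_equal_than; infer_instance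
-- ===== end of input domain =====

-- B replaces A's running-pair dict-building loop by index arithmetic: fast-doubling
-- Fibonacci by index, a search for the largest index k with F(k) ≤ n, and a dict
-- comprehension over the index range (objective: alternative algorithm); return values only.

-- ===== PORT A =====
-- A's 'while True' loop; fuel is only a totality guard (b strictly increases every
-- iteration, so n.toNat + 1 steps are never exhausted)
def pvFibLoopA (fuel : Nat) (n a b : Int) (d : PySem.Dict Int (Option Int)) :
    PySem.Dict Int (Option Int) :=
  match fuel with
  | 0 => d.insert b none
  | fuel + 1 =>
    if a + b ≤ n then pvFibLoopA fuel n b (a + b) (d.insert b (some (a + b)))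
    else d.insert b none

def gen_all_fibs_less_or_equal_than (n : Int) : List (Int × Option Int) :=
  (pvFibLoopA (n.toNat + 1) n 1 1 PySem.Dict.empty).items

-- ===== PORT B =====
-- _fib_pair(m): fast doubling, returns (F(m), F(m+1))
def pvFibPair (m : Nat) : Int × Int :=
  if m = 0 then (0, 1)
  else
    let p := pvFibPair (m / 2)
    let f := p.1
    let g := p.2
    let c := f * (2 * g - f)
    let d := f * f + g * g
    if m % 2 = 1 then (d, c + d) else (c, d)
decreasing_by exact Nat.div_lt_self (Nat.pos_of_ne_zero (by assumption)) (by omega)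

-- _fib(m)
def pvFib (m : Nat) : Int := (pvFibPair m).1

-- B's 'while _fib(k + 1) <= n: k += 1' search (same totality guard)
def pvFindK (fuel : Nat) (k : Nat) (n : Int) : Nat :=
  match fuel with
  | 0 => k
  | fuel + 1 => if pvFib (k + 1) ≤ n then pvFindK fuel (k + 1) n else k

-- the dict comprehension over range(2, k + 1)
def gen_all_fibs_less_or_equal_than_alt (n : Int) : List (Int × Option Int) :=
  let k := pvFindK (n.toNat + 1) 2 n
  ((List.range' 2 (k - 1)).foldl
    (fun d i => d.insert (pvFib i) (if i < k then some (pvFib (i + 1)) else none))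
    PySem.Dict.empty).items

-- ===== PRECONDITION & SPEC =====
def Spec_gen_all_fibs_less_or_equal_than (n : Int) (out : List (Int × Option Int)) : Prop := out = gen_all_fibs_less_or_equal_than_alt n
instance (n : Int) (out : List (Int × Option Int)) : Decidable (Spec_gen_all_fibs_less_or_equal_than n out) := by unfold Spec_gen_all_fibs_less_or_equal_than; infer_instance

-- ===== CLAIM (what is proved, stated in full; the proofs are below) =====
def Claim_equal_gen_all_fibs_less_or_equal_than : Prop := ∀ (n : Int), Dom_gen_all_fibs_less_or_equal_than n → Spec_gen_all_fibs_less_or_equal_than n (gen_all_fibs_less_or_equal_than n)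

-- ===== LEMMAS AND PROOFS =====

-- fast doubling computes Fibonacci
lemma pvFibPair_eq (m : Nat) :
    pvFibPair m = ((Nat.fib m : Int), (Nat.fib (m + 1) : Int)) := by
  induction m using Nat.strong_induction_on with
  | _ m ih =>
    rw [pvFibPair]
    by_cases hm : m = 0
    · subst hm; simp
    rw [if_neg hm, ih (m / 2) (Nat.div_lt_self (Nat.pos_of_ne_zero hm) (by omega))]
    by_cases hpar : m % 2 = 1
    · rw [if_pos hpar]
      obtain ⟨j, rfl⟩ : ∃ j, m = 2 * j + 1 := ⟨m / 2, by omega⟩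
      have hle : Nat.fib j ≤ 2 * Nat.fib (j + 1) :=
        le_trans (Nat.fib_le_fib_succ) (by omega)
      have hdiv : (2 * j + 1) / 2 = j := by omega
      rw [hdiv]
      refine Prod.ext ?_ ?_
      · show ((Nat.fib j : Int) * (Nat.fib j : Int)
            + (Nat.fib (j + 1) : Int) * (Nat.fib (j + 1) : Int)) = (Nat.fib (2 * j + 1) : Int)
        rw [Nat.fib_two_mul_add_one]
        push_cast; ring
      · show ((Nat.fib j : Int) * (2 * (Nat.fib (j + 1) : Int) - (Nat.fib j : Int))
            + ((Nat.fib j : Int) * (Nat.fib j : Int)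
              + (Nat.fib (j + 1) : Int) * (Nat.fib (j + 1) : Int))) = (Nat.fib (2 * j + 1 + 1) : Int)
        rw [show 2 * j + 1 + 1 = 2 * j + 2 from by omega, Nat.fib_add_two,
            Nat.fib_two_mul, Nat.fib_two_mul_add_one]
        push_cast [hle]; ring
    · rw [if_neg hpar]
      obtain ⟨j, rfl⟩ : ∃ j, m = 2 * j := ⟨m / 2, by omega⟩
      have hle : Nat.fib j ≤ 2 * Nat.fib (j + 1) :=
        le_trans (Nat.fib_le_fib_succ) (by omega)
      have hdiv : 2 * j / 2 = j := by omega
      rw [hdiv]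
      refine Prod.ext ?_ ?_
      · show ((Nat.fib j : Int) * (2 * (Nat.fib (j + 1) : Int) - (Nat.fib j : Int)))
            = (Nat.fib (2 * j) : Int)
        rw [Nat.fib_two_mul]
        push_cast [hle]; ring
      · show ((Nat.fib j : Int) * (Nat.fib j : Int)
            + (Nat.fib (j + 1) : Int) * (Nat.fib (j + 1) : Int)) = (Nat.fib (2 * j + 1) : Int)
        rw [Nat.fib_two_mul_add_one]
        push_cast; ring

lemma pvFib_eq (m : Nat) : pvFib m = (Nat.fib m : Int) := by
  rw [pvFib, pvFibPair_eq]

-- shared canonical result: pairs from index k on, driven by the same fuel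
def pvPairsFrom (n : Int) : Nat → Nat → List (Int × Option Int)
  | 0, k => [((Nat.fib k : Int), none)]
  | fuel + 1, k =>
    if (Nat.fib (k + 1) : Int) ≤ n then
      ((Nat.fib k : Int), some (Nat.fib (k + 1) : Int)) :: pvPairsFrom n fuel (k + 1)
    else [((Nat.fib k : Int), none)]

lemma pvFindK_ge (fuel k : Nat) (n : Int) : k ≤ pvFindK fuel k n := by
  induction fuel generalizing k with
  | zero => simp [pvFindK]
  | succ fuel ih =>
    rw [pvFindK]
    split_ifs with h
    · exact le_trans (by omega) (ih (k + 1))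
    · exact le_rfl

-- B's index range, mapped, is exactly the canonical pair list
lemma pvRange_eq_pairsFrom (n : Int) (fuel k : Nat) :
    (List.range' k (pvFindK fuel k n - k + 1)).map
      (fun i => ((Nat.fib i : Int),
        if i < pvFindK fuel k n then some (Nat.fib (i + 1) : Int) else none))
      = pvPairsFrom n fuel k := by
  induction fuel generalizing k with
  | zero =>
    simp [pvFindK, pvPairsFrom, List.range'_succ]
  | succ fuel ih =>
    by_cases h : (Nat.fib (k + 1) : Int) ≤ n
    · have hstep : pvFindK (fuel + 1) k n = pvFindK fuel (k + 1) n := by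
        rw [pvFindK, pvFib_eq, if_pos h]
      have hge : k + 1 ≤ pvFindK fuel (k + 1) n := pvFindK_ge fuel (k + 1) n
      rw [pvPairsFrom, if_pos h, hstep,
          show pvFindK fuel (k + 1) n - k + 1 = (pvFindK fuel (k + 1) n - (k + 1) + 1) + 1
            from by omega,
          List.range'_succ, List.map_cons, if_pos (show k < pvFindK fuel (k + 1) n from by omega),
          ih (k + 1)]
    · have hstep : pvFindK (fuel + 1) k n = k := by
        rw [pvFindK, pvFib_eq, if_neg h]
      rw [pvPairsFrom, if_neg h, hstep]
      simp [List.range'_succ]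

-- keys of the canonical list are at least fib k and strictly increasing
lemma pvPairsFrom_keys_lt (n : Int) (fuel : Nat) :
    ∀ k : Nat, 2 ≤ k → ∀ p ∈ pvPairsFrom n fuel (k + 1), (Nat.fib k : Int) < p.1 := by
  induction fuel with
  | zero =>
    intro k hk p hp
    rw [pvPairsFrom] at hp
    simp only [List.mem_singleton] at hp
    subst hp
    show (Nat.fib k : Int) < (Nat.fib (k + 1) : Int)
    exact_mod_cast Nat.fib_lt_fib_succ hk
  | succ fuel ih =>
    intro k hk p hp
    rw [pvPairsFrom] at hp
    have hlt : (Nat.fib k : Int) < (Nat.fib (k + 1) : Int) := by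
      exact_mod_cast Nat.fib_lt_fib_succ hk
    split_ifs at hp with h
    · rcases List.mem_cons.mp hp with rfl | hp
      · exact hlt
      · have := ih (k + 1) (by omega) p hp
        omega
    · simp only [List.mem_singleton] at hp
      subst hp
      exact hlt

lemma pvPairsFrom_keys_pairwise (n : Int) (fuel : Nat) :
    ∀ k : Nat, 2 ≤ k → ((pvPairsFrom n fuel k).map Prod.fst).Pairwise (· < ·) := by
  induction fuel with
  | zero => intro k _; simp [pvPairsFrom]
  | succ fuel ih =>
    intro k hk
    rw [pvPairsFrom]
    split_ifs with h
    · rw [List.map_cons]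
      refine List.Pairwise.cons ?_ (ih (k + 1) (by omega))
      intro x hx
      obtain ⟨p, hp, rfl⟩ := List.mem_map.mp hx
      exact pvPairsFrom_keys_lt n fuel k hk p hp
    · simp

-- A's while-loop appends exactly the canonical pair list
lemma pvFibLoopA_items (n : Int) (fuel : Nat) :
    ∀ (k : Nat) (d : PySem.Dict Int (Option Int)), 2 ≤ k →
    (∀ key ∈ d.keys, key < (Nat.fib k : Int)) →
    (pvFibLoopA fuel n (Nat.fib (k - 1) : Int) (Nat.fib k : Int) d).items =
      d.items ++ pvPairsFrom n fuel k := by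
  induction fuel with
  | zero =>
    intro k d hk hfresh
    have hcont : d.contains (Nat.fib k : Int) = false := by
      rw [← Bool.not_eq_true, PySem.Dict.contains_iff_mem_keys]
      intro hmem; exact absurd (hfresh _ hmem) (by omega)
    rw [pvFibLoopA, pvPairsFrom, PySem.Dict.items_insert_of_not_contains d _ hcont]
  | succ fuel ih =>
    intro k d hk hfresh
    have hsum : (Nat.fib (k - 1) : Int) + (Nat.fib k : Int) = (Nat.fib (k + 1) : Int) := by
      have h1 : k + 1 = (k - 1) + 2 := by omega
      have h2 : (k - 1) + 1 = k := by omega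
      rw [h1, Nat.fib_add_two, h2]
      push_cast; ring
    have hcont : d.contains (Nat.fib k : Int) = false := by
      rw [← Bool.not_eq_true, PySem.Dict.contains_iff_mem_keys]
      intro hmem; exact absurd (hfresh _ hmem) (by omega)
    rw [pvFibLoopA, pvPairsFrom, hsum]
    split_ifs with h
    · have hlt : (Nat.fib k : Int) < (Nat.fib (k + 1) : Int) := by
        exact_mod_cast Nat.fib_lt_fib_succ hk
      have hfresh' : ∀ key ∈ (d.insert (Nat.fib k : Int) (some (Nat.fib (k + 1) : Int))).keys,
          key < (Nat.fib (k + 1) : Int) := by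
        intro key hkey
        rw [PySem.Dict.keys_insert_of_not_contains d _ hcont] at hkey
        rcases List.mem_append.mp hkey with hkey | hkey
        · have := hfresh key hkey; omega
        · simp at hkey; omega
      have hk1 : (k + 1) - 1 = k := by omega
      have := ih (k + 1) (d.insert (Nat.fib k : Int) (some (Nat.fib (k + 1) : Int)))
        (by omega) hfresh'
      rw [hk1] at this
      rw [this, PySem.Dict.items_insert_of_not_contains d _ hcont]
      simp
    · rw [PySem.Dict.items_insert_of_not_contains d _ hcont]

-- ===== VERDICT (by name: the statement is the Claim_ definition above) =====
theorem gen_all_fibs_less_or_equal_than_spec : Claim_equal_gen_all_fibs_less_or_equal_than := by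
  intro n _
  unfold Spec_gen_all_fibs_less_or_equal_than
  unfold gen_all_fibs_less_or_equal_than gen_all_fibs_less_or_equal_than_alt
  -- rewrite B's fib calls to Nat.fib
  have hfun :
      (fun (d : PySem.Dict Int (Option Int)) (i : Nat) =>
          d.insert (pvFib i)
            (if i < pvFindK (n.toNat + 1) 2 n then some (pvFib (i + 1)) else none)) =
      (fun (d : PySem.Dict Int (Option Int)) (i : Nat) =>
          d.insert (Nat.fib i : Int)
            (if i < pvFindK (n.toNat + 1) 2 n then some (Nat.fib (i + 1) : Int) else none)) := by
    funext d i
    rw [pvFib_eq, pvFib_eq]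
  show (pvFibLoopA (n.toNat + 1) n 1 1 PySem.Dict.empty).items = _
  simp only [hfun]
  set K := pvFindK (n.toNat + 1) 2 n with hK
  have hKge : 2 ≤ K := pvFindK_ge (n.toNat + 1) 2 n
  have hlen : K - 1 = K - 2 + 1 := by omega
  -- B's fold over fresh distinct keys appends the mapped list
  have hmap := pvRange_eq_pairsFrom n (n.toNat + 1) 2
  rw [← hK, show K - 2 + 1 = K - 1 from by omega] at hmap
  have hnodup : ((List.range' 2 (K - 1)).map (fun i => (Nat.fib i : Int))).Nodup := by
    have := pvPairsFrom_keys_pairwise n (n.toNat + 1) 2 (by omega)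
    rw [← hmap, List.map_map] at this
    exact List.Pairwise.nodup (by
      simpa [Function.comp] using this)
  have hfold := PySem.Dict.items_foldl_insert_fresh (List.range' 2 (K - 1))
    (fun i => (Nat.fib i : Int))
    (fun i => if i < K then some (Nat.fib (i + 1) : Int) else none)
    (PySem.Dict.empty : PySem.Dict Int (Option Int))
    (fun a _ => PySem.Dict.contains_empty _) hnodup
  rw [hfold]
  -- A's loop starts at k = 2 : fib 1 = 1, fib 2 = 1
  have hA := pvFibLoopA_items n (n.toNat + 1) 2 PySem.Dict.empty (by omega) (by simp)
  norm_num [Nat.fib] at hA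
  rw [hA, hmap]
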